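-- pv_equiv track=rewrite | github.com/GangEunzzang/qry | src/qry/domains/query/formatter.py | _merge_multi_word_keywords
-- ===== SOURCE A (Python) =====
-- _MULTI_WORD_KEYWORDS = [
--     "ORDER BY",
--     "GROUP BY",
--     "LEFT JOIN",
--     "RIGHT JOIN",
--     "INNER JOIN",
--     "OUTER JOIN",
--     "LEFT OUTER JOIN",
--     "RIGHT OUTER JOIN",
--     "CROSS JOIN",
--     "UNION ALL",
--     "INSERT INTO",
--     "NOT IN",
--     "NOT LIKE",
--     "NOT NULL",
--     "IS NOT",
--     "IS NULL",
-- ]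
--
-- def _merge_multi_word_keywords(
--     tokens: list[tuple[str, str]],
-- ) -> list[tuple[str, str]]:
--     """Merge multi-word SQL keywords into single tokens."""
--     result: list[tuple[str, str]] = []
--     i = 0
--
--     while i < len(tokens):
--         # Try matching multi-word keywords (up to 3 words)
--         merged = False
--         for length in (3, 2):
--             words: list[str] = []
--             positions: list[int] = []
--             j = i
--             while j < len(tokens) and len(words) < length:
--                 if tokens[j][0] == "whitespace":
--                     j += 1
--                     continue
--                 if tokens[j][0] == "word":
--                     words.append(tokens[j][1].upper())
--                     positions.append(j)
--                     j += 1
--                 else: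
--                     break
--
--             if len(words) == length:
--                 candidate = " ".join(words)
--                 if candidate in _MULTI_WORD_KEYWORDS:
--                     result.append(("word", candidate))
--                     i = j
--                     merged = True
--                     break
--
--         if not merged:
--             result.append(tokens[i])
--             i += 1
--
--     return result
-- ===== SOURCE B (Python) =====
-- _MULTI_WORD_KEYWORDS = [
--     "ORDER BY",
--     "GROUP BY",
--     "LEFT JOIN",
--     "RIGHT JOIN",
--     "INNER JOIN",
--     "OUTER JOIN",
--     "LEFT OUTER JOIN",
--     "RIGHT OUTER JOIN",
--     "CROSS JOIN",
--     "UNION ALL",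
--     "INSERT INTO",
--     "NOT IN",
--     "NOT LIKE",
--     "NOT NULL",
--     "IS NOT",
--     "IS NULL",
-- ]
--
-- _KEYWORD_SET = frozenset(_MULTI_WORD_KEYWORDS)
--
--
-- def _merge_multi_word_keywords(tokens):
--     # Stage 1: one pass extracting the "spine" of non-whitespace tokens:
--     # (index, UPPER text) for words, (index, None) for any other separator token.
--     spine = []
--     for idx, (kind, text) in enumerate(tokens):
--         if kind == "word":
--             spine.append((idx, text.upper()))
--         elif kind != "whitespace":
--             spine.append((idx, None))
--
--     # Stage 2: one greedy pass over the spine; untouched stretches of the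
--     # original token list are copied verbatim by slicing (pos = first index not
--     # yet emitted, start = where a merge beginning at spine[k] would start
--     # consuming, i.e. just after the previous spine element).
--     out = []
--     pos = 0
--     start = 0
--     k = 0
--     while k < len(spine):
--         w3 = spine[k:k + 3]
--         if (len(w3) == 3 and all(w is not None for _, w in w3)
--                 and " ".join(w for _, w in w3) in _KEYWORD_SET):
--             out.extend(tokens[pos:start])
--             out.append(("word", " ".join(w for _, w in w3)))
--             pos = w3[2][0] + 1
--             start = pos
--             k += 3
--         elif (len(w3) >= 2 and w3[0][1] is not None and w3[1][1] is not None
--                 and " ".join([w3[0][1], w3[1][1]]) in _KEYWORD_SET):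
--             out.extend(tokens[pos:start])
--             out.append(("word", " ".join([w3[0][1], w3[1][1]])))
--             pos = w3[1][0] + 1
--             start = pos
--             k += 2
--         else:
--             start = w3[0][0] + 1
--             k += 1
--     out.extend(tokens[pos:])
--     return out
-- ===== Notes on version B (the rewrite author's own statement) =====
-- stated objective: alternative
-- what changed: B is a staged algorithm instead of A's per-position rescans: one pass extracts a spine of non-whitespace tokens (words uppercased, other tokens as barriers), one greedy pass over that spine decides the merges, and untouched stretches of the original token list are emitted verbatim by slice copying between consumed ranges; A instead re-scans the token list from every position, twice (length 3, then length 2).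
import Mathlib
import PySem

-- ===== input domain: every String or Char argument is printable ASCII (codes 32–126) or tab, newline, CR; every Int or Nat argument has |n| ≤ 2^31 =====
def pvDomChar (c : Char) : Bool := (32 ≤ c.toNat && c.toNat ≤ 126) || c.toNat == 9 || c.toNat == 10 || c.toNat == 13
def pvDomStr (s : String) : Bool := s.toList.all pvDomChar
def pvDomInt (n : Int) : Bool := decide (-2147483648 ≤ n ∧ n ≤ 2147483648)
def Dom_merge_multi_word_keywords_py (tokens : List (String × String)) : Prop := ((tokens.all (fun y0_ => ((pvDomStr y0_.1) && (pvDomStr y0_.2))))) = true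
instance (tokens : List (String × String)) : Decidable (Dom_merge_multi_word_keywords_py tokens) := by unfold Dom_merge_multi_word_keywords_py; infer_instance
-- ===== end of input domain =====

-- B is a staged algorithm (spine extraction pass, greedy pass over the spine, verbatim slice
-- copying of untouched stretches) instead of A's per-position double rescan (objective:
-- alternative; equal return values proved below).

-- ===== PORT A =====
def pvMultiWordKeywords : List String :=
  ["ORDER BY", "GROUP BY", "LEFT JOIN", "RIGHT JOIN", "INNER JOIN", "OUTER JOIN",
   "LEFT OUTER JOIN", "RIGHT OUTER JOIN", "CROSS JOIN", "UNION ALL", "INSERT INTO",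
   "NOT IN", "NOT LIKE", "NOT NULL", "IS NOT", "IS NULL"]

-- A's inner `while j < len(tokens) and len(words) < length` scan; returns (words, j).
def pvScanA (tokens : List (String × String)) (j : Nat) (words : List String) (len : Nat) :
    List String × Nat :=
  if h : j < tokens.length then
    if words.length < len then
      if (tokens[j]).1 = "whitespace" then pvScanA tokens (j+1) words len
      else if (tokens[j]).1 = "word" then
        pvScanA tokens (j+1) (words ++ [PySem.Str.upper (tokens[j]).2]) len
      else (words, j)
    else (words, j)
  else (words, j)
termination_by tokens.length - j
decreasing_by all_goals exact Nat.sub_succ_lt_self _ _ h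

-- A's outer while loop over i: fuel = tokens.length bounds the iteration count
-- (i strictly increases each round), so the guard is a pure totality device.
def pvLoopA (tokens : List (String × String)) (fuel : Nat) (i : Nat) : List (String × String) :=
  match fuel with
  | 0 => []
  | fuel + 1 =>
    if hi : i < tokens.length then
      if h3 : (pvScanA tokens i [] 3).1.length = 3 ∧
          PySem.Str.join " " (pvScanA tokens i [] 3).1 ∈ pvMultiWordKeywords then
        ("word", PySem.Str.join " " (pvScanA tokens i [] 3).1) ::
          pvLoopA tokens fuel (pvScanA tokens i [] 3).2
      else if h2 : (pvScanA tokens i [] 2).1.length = 2 ∧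
          PySem.Str.join " " (pvScanA tokens i [] 2).1 ∈ pvMultiWordKeywords then
        ("word", PySem.Str.join " " (pvScanA tokens i [] 2).1) ::
          pvLoopA tokens fuel (pvScanA tokens i [] 2).2
      else
        tokens[i] :: pvLoopA tokens fuel (i + 1)
    else []

def merge_multi_word_keywords_py (tokens : List (String × String)) : List (String × String) :=
  pvLoopA tokens tokens.length 0

-- ===== PORT B =====
def pvKeywordSet : PySem.Set String := PySem.Set.ofList pvMultiWordKeywords

-- B stage 1: the fold body of the spine-building pass (enumerate counter carried as .1).
def pvSpineStep (st : Nat × List (Nat × Option String)) (t : String × String) :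
    Nat × List (Nat × Option String) :=
  if t.1 = "word" then (st.1 + 1, st.2 ++ [(st.1, some (PySem.Str.upper t.2))])
  else if t.1 = "whitespace" then (st.1 + 1, st.2)
  else (st.1 + 1, st.2 ++ [(st.1, none)])

def pvDefEnt : Nat × Option String := (0, none)

-- B stage 2: the greedy pass over the spine; fuel = spine.length bounds the
-- iteration count (k increases by at least 1 each round).
def pvLoopB (tokens : List (String × String)) (spine : List (Nat × Option String)) :
    Nat → Nat → Nat → Nat → List (String × String)
  | 0, _, pos, _ => PySem.List.slice tokens (some (pos : Int)) none
  | fuel + 1, k, pos, start =>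
    if k < spine.length then
      let w3 := PySem.List.slice spine (some (k : Int)) (some ((k : Int) + 3))
      if (w3.length == 3) && (w3.all fun p => p.2.isSome) &&
          PySem.Set.contains pvKeywordSet
            (PySem.Str.join " " (w3.map fun p => p.2.getD "")) then
        PySem.List.slice tokens (some (pos : Int)) (some (start : Int)) ++
          ("word", PySem.Str.join " " (w3.map fun p => p.2.getD "")) ::
          pvLoopB tokens spine fuel (k + 3) ((w3.getD 2 pvDefEnt).1 + 1)
            ((w3.getD 2 pvDefEnt).1 + 1)
      else if (decide (2 ≤ w3.length)) && (w3.getD 0 pvDefEnt).2.isSome &&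
          (w3.getD 1 pvDefEnt).2.isSome &&
          PySem.Set.contains pvKeywordSet
            (PySem.Str.join " " [(w3.getD 0 pvDefEnt).2.getD "", (w3.getD 1 pvDefEnt).2.getD ""]) then
        PySem.List.slice tokens (some (pos : Int)) (some (start : Int)) ++
          ("word", PySem.Str.join " " [(w3.getD 0 pvDefEnt).2.getD "", (w3.getD 1 pvDefEnt).2.getD ""]) ::
          pvLoopB tokens spine fuel (k + 2) ((w3.getD 1 pvDefEnt).1 + 1)
            ((w3.getD 1 pvDefEnt).1 + 1)
      else
        pvLoopB tokens spine fuel (k + 1) pos ((w3.getD 0 pvDefEnt).1 + 1)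
    else PySem.List.slice tokens (some (pos : Int)) none

def merge_multi_word_keywords_py_alt (tokens : List (String × String)) :
    List (String × String) :=
  let spine := (tokens.foldl pvSpineStep (0, [])).2
  pvLoopB tokens spine spine.length 0 0 0

-- ===== PRECONDITION & SPEC =====
def Spec_merge_multi_word_keywords_py (tokens : List (String × String)) (out : List (String × String)) : Prop := out = merge_multi_word_keywords_py_alt tokens
instance (tokens : List (String × String)) (out : List (String × String)) : Decidable (Spec_merge_multi_word_keywords_py tokens out) := by unfold Spec_merge_multi_word_keywords_py; infer_instance

-- ===== CLAIM (what is proved, stated in full; the proofs are below) =====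
def Claim_equal_merge_multi_word_keywords_py : Prop := ∀ (tokens : List (String × String)), Dom_merge_multi_word_keywords_py tokens → Spec_merge_multi_word_keywords_py tokens (merge_multi_word_keywords_py tokens)

-- ===== LEMMAS AND PROOFS =====

-- Abstract gather: up to k (uppercased word, end index) pairs from position j.
def pvG (tokens : List (String × String)) (j : Nat) (k : Nat) : List (String × Nat) :=
  if h : j < tokens.length then
    if 0 < k then
      if (tokens[j]).1 = "whitespace" then pvG tokens (j+1) k
      else if (tokens[j]).1 = "word" then
        (PySem.Str.upper (tokens[j]).2, j+1) :: pvG tokens (j+1) (k-1)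
      else []
    else []
  else []
termination_by tokens.length - j

-- The spine of non-whitespace tokens from position i on.
def pvSpineFrom (tokens : List (String × String)) (i : Nat) : List (Nat × Option String) :=
  if h : i < tokens.length then
    if (tokens[i]).1 = "word" then (i, some (PySem.Str.upper (tokens[i]).2)) :: pvSpineFrom tokens (i+1)
    else if (tokens[i]).1 = "whitespace" then pvSpineFrom tokens (i+1)
    else (i, none) :: pvSpineFrom tokens (i+1)
  else []
termination_by tokens.length - i

-- Structural spine over a list suffix.
def pvSpineAux : Nat → List (String × String) → List (Nat × Option String)
  | _, [] => []
  | i, t :: ts =>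
    if t.1 = "word" then (i, some (PySem.Str.upper t.2)) :: pvSpineAux (i+1) ts
    else if t.1 = "whitespace" then pvSpineAux (i+1) ts
    else (i, none) :: pvSpineAux (i+1) ts

-- Take up to k leading word entries of a spine, as (word, index after it).
def pvWtake : Nat → List (Nat × Option String) → List (String × Nat)
  | 0, _ => []
  | _, [] => []
  | _+1, (_, none) :: _ => []
  | k+1, (i, some w) :: s => (w, i+1) :: pvWtake k s

-- one-step equations for pvG
theorem pvG_ws (tokens : List (String × String)) {j : Nat} (k : Nat) (h1 : j < tokens.length)
    (h3 : (tokens[j]).1 = "whitespace") (hk : 0 < k) :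
    pvG tokens j k = pvG tokens (j+1) k := by
  rw [pvG]; simp [h1, h3, hk]

theorem pvG_word (tokens : List (String × String)) {j : Nat} (k : Nat) (h1 : j < tokens.length)
    (h3 : ¬ (tokens[j]).1 = "whitespace") (h4 : (tokens[j]).1 = "word") (hk : 0 < k) :
    pvG tokens j k = (PySem.Str.upper (tokens[j]).2, j+1) :: pvG tokens (j+1) (k-1) := by
  rw [pvG]; simp [h1, h3, h4, hk]

theorem pvG_stop (tokens : List (String × String)) {j : Nat} (k : Nat) (h1 : j < tokens.length)
    (h3 : ¬ (tokens[j]).1 = "whitespace") (h4 : ¬ (tokens[j]).1 = "word") :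
    pvG tokens j k = [] := by
  rw [pvG]; simp [h1, h3, h4]

theorem pvG_zero (tokens : List (String × String)) (j : Nat) : pvG tokens j 0 = [] := by
  rw [pvG]; simp

theorem pvG_oob (tokens : List (String × String)) {j : Nat} (k : Nat)
    (h1 : ¬ j < tokens.length) : pvG tokens j k = [] := by
  rw [pvG]; simp [h1]

theorem pvGetLastD_irrel {α : Type} (l : List α) (h : l ≠ []) (d d' : α) :
    l.getLastD d = l.getLastD d' := by
  cases l with
  | nil => simp at h
  | cons a t => rw [List.getLastD_cons, List.getLastD_cons]

theorem pvScanA_fst (tokens : List (String × String)) (j : Nat) (words : List String)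
    (len : Nat) (h : words.length ≤ len) :
    (pvScanA tokens j words len).1 = words ++ (pvG tokens j (len - words.length)).map Prod.fst := by
  fun_induction pvScanA tokens j words len with
  | case1 j words h1 h2 h3 ih =>
      rw [ih h, pvG_ws tokens _ h1 h3 (by omega)]
  | case2 j words h1 h2 h3 h4 ih =>
      rw [ih (by simp; omega), pvG_word tokens _ h1 h3 h4 (by omega)]
      simp [Nat.sub_sub]
  | case3 j words h1 h2 h3 h4 => rw [pvG_stop tokens _ h1 h3 h4]; simp
  | case4 j words h1 h2 =>
      have : len - words.length = 0 := by omega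
      rw [this, pvG_zero]; simp
  | case5 j words h1 => rw [pvG_oob tokens _ h1]; simp

theorem pvScanA_snd_full (tokens : List (String × String)) (j : Nat) (words : List String)
    (len : Nat) (h : words.length ≤ len)
    (hf : (pvG tokens j (len - words.length)).length = len - words.length) :
    (pvScanA tokens j words len).2 = ((pvG tokens j (len - words.length)).map Prod.snd).getLastD j := by
  fun_induction pvScanA tokens j words len with
  | case1 j words h1 h2 h3 ih =>
      rw [pvG_ws tokens _ h1 h3 (by omega)] at hf ⊢
      rw [ih h hf]
      exact (pvGetLastD_irrel _ (by intro hnil; simp only [List.map_eq_nil_iff] at hnil; rw [hnil] at hf; simp at hf; omega) _ _).symm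
  | case2 j words h1 h2 h3 h4 ih =>
      rw [pvG_word tokens _ h1 h3 h4 (by omega)] at hf ⊢
      simp only [List.length_cons] at hf
      have hlen : len - (words ++ [PySem.Str.upper (tokens[j]).2]).length
          = len - words.length - 1 := by simp [Nat.sub_sub]
      have hf' : (pvG tokens (j+1) (len - (words ++ [PySem.Str.upper (tokens[j]).2]).length)).length
          = len - (words ++ [PySem.Str.upper (tokens[j]).2]).length := by
        rw [hlen]; omega
      rw [ih (by simp; omega) hf', List.map_cons, List.getLastD_cons, hlen]
  | case3 j words h1 h2 h3 h4 =>
      rw [pvG_stop tokens _ h1 h3 h4] at hf; simp at hf; omega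
  | case4 j words h1 h2 =>
      have h0 : len - words.length = 0 := by omega
      rw [h0, pvG_zero]; simp
  | case5 j words h1 => rw [pvG_oob tokens _ h1]; simp

theorem pvG_take (tokens : List (String × String)) (j : Nat) (k k' : Nat) (h : k ≤ k') :
    pvG tokens j k = (pvG tokens j k').take k := by
  fun_induction pvG tokens j k' generalizing k with
  | case1 j k' h1 h2 h3 ih =>
      rcases Nat.eq_zero_or_pos k with hk | hk
      · subst hk; rw [pvG_zero]; simp
      · rw [pvG_ws tokens _ h1 h3 hk]; exact ih k h
  | case2 j k' h1 h2 h3 h4 ih =>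
      cases k with
      | zero => rw [pvG_zero]; simp
      | succ m =>
          rw [pvG_word tokens _ h1 h3 h4 (by omega), List.take_succ_cons]
          simp only [Nat.add_sub_cancel]
          rw [ih m (by omega)]
  | case3 j k' h1 h2 h3 h4 =>
      rw [pvG_stop tokens _ h1 h3 h4]
      simp
  | case4 j k' h1 h2 =>
      have : k = 0 := by omega
      subst this; rw [pvG_zero]; simp
  | case5 j k' h1 => rw [pvG_oob tokens _ h1]; simp

-- spine one-step equations
theorem pvSpineFrom_ws (tokens : List (String × String)) {i : Nat} (h1 : i < tokens.length)
    (h2 : (tokens[i]).1 = "whitespace") : pvSpineFrom tokens i = pvSpineFrom tokens (i+1) := by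
  rw [pvSpineFrom]
  have : ¬ (tokens[i]).1 = "word" := by rw [h2]; simp
  simp [h1, h2, this]

theorem pvSpineFrom_oob (tokens : List (String × String)) {i : Nat}
    (h1 : ¬ i < tokens.length) : pvSpineFrom tokens i = [] := by
  rw [pvSpineFrom]; simp [h1]

-- the gather is the word-prefix of the spine
theorem pvG_spine (tokens : List (String × String)) (j k : Nat) :
    pvG tokens j k = pvWtake k (pvSpineFrom tokens j) := by
  fun_induction pvG tokens j k with
  | case1 j k h1 h2 h3 ih => rw [pvSpineFrom_ws tokens h1 h3]; exact ih
  | case2 j k h1 h2 h3 h4 ih =>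
      rw [pvSpineFrom]
      simp only [h1, h4, dif_pos, if_pos]
      cases k with
      | zero => omega
      | succ m => simpa [pvWtake] using ih
  | case3 j k h1 h2 h3 h4 =>
      rw [pvSpineFrom]
      simp only [h1, h4, h3, dif_pos, if_neg, if_pos]
      cases k with
      | zero => omega
      | succ m => simp [pvWtake]
  | case4 j k h1 h2 =>
      have : k = 0 := by omega
      subst this; cases pvSpineFrom tokens j <;> simp [pvWtake]
  | case5 j k h1 => rw [pvSpineFrom_oob tokens h1]; cases k <;> simp [pvWtake]

-- head structure of the spine
theorem pvSpineFrom_cons_word (tokens : List (String × String)) {i : Nat}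
    (h1 : i < tokens.length) (h2 : (tokens[i]).1 = "word") :
    pvSpineFrom tokens i = (i, some (PySem.Str.upper (tokens[i]).2)) :: pvSpineFrom tokens (i+1) := by
  rw [pvSpineFrom]; simp [h1, h2]

theorem pvSpineFrom_cons_other (tokens : List (String × String)) {i : Nat}
    (h1 : i < tokens.length) (h2 : ¬ (tokens[i]).1 = "word") (h3 : ¬ (tokens[i]).1 = "whitespace") :
    pvSpineFrom tokens i = (i, none) :: pvSpineFrom tokens (i+1) := by
  rw [pvSpineFrom]; simp [h1, h2, h3]

theorem pvSpineFrom_head (tokens : List (String × String)) :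
    ∀ n i j e rest, tokens.length - i ≤ n →
    pvSpineFrom tokens i = (j, e) :: rest →
    i ≤ j ∧ j < tokens.length ∧ rest = pvSpineFrom tokens (j+1) ∧
      (∀ m (hm : m < tokens.length), i ≤ m → m < j → (tokens[m]).1 = "whitespace") := by
  intro n
  induction n with
  | zero =>
      intro i j e rest hn h
      rw [pvSpineFrom_oob tokens (by omega)] at h
      exact absurd h (by simp)
  | succ n ih =>
      intro i j e rest hn h
      by_cases h1 : i < tokens.length
      · by_cases hw : (tokens[i]).1 = "word"
        · rw [pvSpineFrom_cons_word tokens h1 hw] at h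
          simp only [List.cons.injEq, Prod.mk.injEq] at h
          obtain ⟨⟨hj, he⟩, hrest⟩ := h
          subst hj
          exact ⟨le_refl _, h1, hrest.symm, fun m hm h1m h2m => by omega⟩
        · by_cases hws : (tokens[i]).1 = "whitespace"
          · rw [pvSpineFrom_ws tokens h1 hws] at h
            obtain ⟨ha, hb, hc, hd⟩ := ih (i+1) j e rest (by omega) h
            refine ⟨by omega, hb, hc, fun m hm h1m h2m => ?_⟩
            rcases Nat.eq_or_lt_of_le h1m with hm' | hm'
            · subst hm'; exact hws
            · exact hd m hm (by omega) h2m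
          · rw [pvSpineFrom_cons_other tokens h1 hw hws] at h
            simp only [List.cons.injEq, Prod.mk.injEq] at h
            obtain ⟨⟨hj, he⟩, hrest⟩ := h
            subst hj
            exact ⟨le_refl _, h1, hrest.symm, fun m hm h1m h2m => by omega⟩
      · rw [pvSpineFrom_oob tokens h1] at h
        exact absurd h (by simp)

theorem pvSpineFrom_nil (tokens : List (String × String)) :
    ∀ n i, tokens.length - i ≤ n → pvSpineFrom tokens i = [] →
    ∀ m (hm : m < tokens.length), i ≤ m → (tokens[m]).1 = "whitespace" := by
  intro n
  induction n with
  | zero => intro i hn h m hm him; omega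
  | succ n ih =>
      intro i hn h m hm him
      by_cases h1 : i < tokens.length
      · by_cases hw : (tokens[i]).1 = "word"
        · rw [pvSpineFrom_cons_word tokens h1 hw] at h; exact absurd h (by simp)
        · by_cases hws : (tokens[i]).1 = "whitespace"
          · rw [pvSpineFrom_ws tokens h1 hws] at h
            rcases Nat.eq_or_lt_of_le him with hm' | hm'
            · subst hm'; exact hws
            · exact ih (i+1) (by omega) h m hm (by omega)
          · rw [pvSpineFrom_cons_other tokens h1 hw hws] at h; exact absurd h (by simp)
      · omega

-- spine construction: the fold equals the structural spine, which equals pvSpineFrom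
theorem pvFold_spine (ts : List (String × String)) (idx : Nat) (acc : List (Nat × Option String)) :
    (ts.foldl pvSpineStep (idx, acc)).2 = acc ++ pvSpineAux idx ts := by
  induction ts generalizing idx acc with
  | nil => simp [pvSpineAux]
  | cons t ts ih =>
      simp only [List.foldl_cons, pvSpineStep, pvSpineAux]
      split_ifs with h1 h2 <;> simp [ih]

theorem pvSpineAux_eq (tokens : List (String × String)) :
    ∀ n i, tokens.length - i ≤ n → pvSpineAux i (tokens.drop i) = pvSpineFrom tokens i := by
  intro n
  induction n with
  | zero =>
      intro i hi
      rw [List.drop_eq_nil_of_le (by omega), pvSpineFrom_oob tokens (by omega)]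
      rfl
  | succ n ih =>
      intro i hi
      by_cases h1 : i < tokens.length
      · rw [List.drop_eq_getElem_cons h1, pvSpineFrom]
        simp only [pvSpineAux, h1, dif_pos]
        rw [ih (i+1) (by omega)]
      · rw [List.drop_eq_nil_of_le (by omega), pvSpineFrom_oob tokens h1]
        rfl

theorem pvSpine_build (tokens : List (String × String)) :
    (tokens.foldl pvSpineStep (0, [])).2 = pvSpineFrom tokens 0 := by
  rw [pvFold_spine]
  simpa using pvSpineAux_eq tokens tokens.length 0 (by omega)

-- A emits one token when no merge applies at i (shape-based no-merge conditions)
theorem pvA_step_emit (tokens : List (String × String)) (i fa : Nat)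
    (j : Nat) (e : Option String) (rest : List (Nat × Option String))
    (hsp : pvSpineFrom tokens i = (j, e) :: rest)
    (hno3 : ∀ w1 i2 w2 i3 w3 r, e = some w1 → rest = (i2, some w2) :: (i3, some w3) :: r →
      PySem.Str.join " " [w1, w2, w3] ∉ pvMultiWordKeywords)
    (hno2 : ∀ w1 i2 w2 r, e = some w1 → rest = (i2, some w2) :: r →
      PySem.Str.join " " [w1, w2] ∉ pvMultiWordKeywords)
    (hi : i < tokens.length) :
    pvLoopA tokens (fa+1) i = tokens[i] :: pvLoopA tokens fa (i+1) := by
  have hA3 : (pvScanA tokens i [] 3).1 = (pvWtake 3 ((j, e) :: rest)).map Prod.fst := by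
    have h := pvScanA_fst tokens i [] 3 (by simp)
    rw [show (3 - List.length ([] : List String)) = 3 from rfl, pvG_spine, hsp] at h
    simpa using h
  have hA2 : (pvScanA tokens i [] 2).1 = ((pvWtake 3 ((j, e) :: rest)).take 2).map Prod.fst := by
    have h := pvScanA_fst tokens i [] 2 (by simp)
    rw [show (2 - List.length ([] : List String)) = 2 from rfl,
        pvG_take tokens i 2 3 (by omega), pvG_spine, hsp] at h
    simpa using h
  rcases e with _ | w1
  · rw [pvLoopA, dif_pos hi, dif_neg (by simp [hA3, pvWtake]),
        dif_neg (by simp [hA2, pvWtake])]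
  · rcases rest with _ | ⟨⟨i2, e2⟩, rest2⟩
    · rw [pvLoopA, dif_pos hi, dif_neg (by simp [hA3, pvWtake]),
          dif_neg (by simp [hA2, pvWtake])]
    · rcases e2 with _ | w2
      · rw [pvLoopA, dif_pos hi, dif_neg (by simp [hA3, pvWtake]),
            dif_neg (by simp [hA2, pvWtake])]
      · have hno2' : PySem.Str.join " " [w1, w2] ∉ pvMultiWordKeywords :=
          hno2 w1 i2 w2 rest2 rfl rfl
        rcases rest2 with _ | ⟨⟨i3, e3⟩, rest3⟩
        · rw [pvLoopA, dif_pos hi, dif_neg (by simp [hA3, pvWtake]),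
              dif_neg (by simp [hA2, pvWtake, hno2'])]
        · rcases e3 with _ | w3
          · rw [pvLoopA, dif_pos hi, dif_neg (by simp [hA3, pvWtake]),
                dif_neg (by simp [hA2, pvWtake, hno2'])]
          · have hno3' : PySem.Str.join " " [w1, w2, w3] ∉ pvMultiWordKeywords :=
              hno3 w1 i2 w2 i3 w3 rest3 rfl rfl
            rw [pvLoopA, dif_pos hi, dif_neg (by simp [hA3, pvWtake, hno3']),
                dif_neg (by simp [hA2, pvWtake, hno2'])]

-- A walks the whitespace run before the spine head and emits it plus the head
theorem pvA_skip (tokens : List (String × String))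
    (j : Nat) (e : Option String) (rest : List (Nat × Option String))
    (hno3 : ∀ w1 i2 w2 i3 w3 r, e = some w1 → rest = (i2, some w2) :: (i3, some w3) :: r →
      PySem.Str.join " " [w1, w2, w3] ∉ pvMultiWordKeywords)
    (hno2 : ∀ w1 i2 w2 r, e = some w1 → rest = (i2, some w2) :: r →
      PySem.Str.join " " [w1, w2] ∉ pvMultiWordKeywords) :
    ∀ d i fa, pvSpineFrom tokens i = (j, e) :: rest → j - i = d → tokens.length ≤ i + fa →
      pvLoopA tokens fa i =
        (tokens.drop i).take (j + 1 - i) ++ pvLoopA tokens (fa - (j + 1 - i)) (j + 1) := by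
  intro d
  induction d with
  | zero =>
      intro i fa hsp hd hfa
      obtain ⟨hij, hjl, hrest, hws⟩ :=
        pvSpineFrom_head tokens tokens.length i j e rest (by omega) hsp
      have hij' : i = j := by omega
      subst hij'
      cases fa with
      | zero => omega
      | succ f =>
          rw [pvA_step_emit tokens i f i e rest hsp hno3 hno2 hjl]
          rw [List.drop_eq_getElem_cons hjl, show i + 1 - i = 1 by omega,
              List.take_succ_cons, List.take_zero, Nat.succ_sub_one]
          simp
  | succ d ih =>
      intro i fa hsp hd hfa
      obtain ⟨hij, hjl, hrest, hws⟩ :=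
        pvSpineFrom_head tokens tokens.length i j e rest (by omega) hsp
      have hilen : i < tokens.length := by omega
      have hwsi : (tokens[i]).1 = "whitespace" := hws i hilen (le_refl i) (by omega)
      cases fa with
      | zero => omega
      | succ f =>
          rw [pvA_step_emit tokens i f j e rest hsp hno3 hno2 hilen]
          have hsp' : pvSpineFrom tokens (i+1) = (j, e) :: rest := by
            rw [← pvSpineFrom_ws tokens hilen hwsi]; exact hsp
          rw [ih (i+1) f hsp' (by omega) (by omega)]
          rw [List.drop_eq_getElem_cons hilen,
              show j + 1 - i = (j + 1 - (i+1)) + 1 by omega, List.take_succ_cons]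
          simp only [Nat.succ_sub_succ, List.cons_append]

-- A merges three words
theorem pvA_merge3 (tokens : List (String × String)) (i fa : Nat)
    (i1 i2 i3 : Nat) (w1 w2 w3 : String) (rest : List (Nat × Option String))
    (hsp : pvSpineFrom tokens i = (i1, some w1) :: (i2, some w2) :: (i3, some w3) :: rest)
    (hm : PySem.Str.join " " [w1, w2, w3] ∈ pvMultiWordKeywords)
    (hfa : tokens.length ≤ i + fa) :
    pvLoopA tokens fa i =
      ("word", PySem.Str.join " " [w1, w2, w3]) :: pvLoopA tokens (fa - 1) (i3 + 1) := by
  obtain ⟨hii1, hi1l, hrest1, -⟩ :=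
    pvSpineFrom_head tokens tokens.length i i1 (some w1) _ (by omega) hsp
  obtain ⟨hii2, hi2l, hrest2, -⟩ :=
    pvSpineFrom_head tokens tokens.length (i1+1) i2 (some w2) _ (by omega) hrest1.symm
  obtain ⟨hii3, hi3l, hrest3, -⟩ :=
    pvSpineFrom_head tokens tokens.length (i2+1) i3 (some w3) _ (by omega) hrest2.symm
  have hg : pvG tokens i 3 = [(w1, i1+1), (w2, i2+1), (w3, i3+1)] := by
    rw [pvG_spine, hsp]; rfl
  have hA3 : (pvScanA tokens i [] 3).1 = [w1, w2, w3] := by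
    have h := pvScanA_fst tokens i [] 3 (by simp)
    rw [show (3 - List.length ([] : List String)) = 3 from rfl, hg] at h
    simpa using h
  have hsnd : (pvScanA tokens i [] 3).2 = i3 + 1 := by
    have h := pvScanA_snd_full tokens i [] 3 (by simp)
      (by rw [show (3 - List.length ([] : List String)) = 3 from rfl, hg]; rfl)
    rw [show (3 - List.length ([] : List String)) = 3 from rfl, hg] at h
    simpa using h
  cases fa with
  | zero => omega
  | succ f =>
      rw [pvLoopA, dif_pos (by omega),
          dif_pos (⟨by rw [hA3]; rfl, by rw [hA3]; exact hm⟩ :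
            (pvScanA tokens i [] 3).1.length = 3 ∧ _)]
      rw [hA3, hsnd]
      simp

-- A merges two words
theorem pvA_merge2 (tokens : List (String × String)) (i fa : Nat)
    (i1 i2 : Nat) (w1 w2 : String) (rest : List (Nat × Option String))
    (hsp : pvSpineFrom tokens i = (i1, some w1) :: (i2, some w2) :: rest)
    (hno3 : ∀ i3 w3 r, rest = (i3, some w3) :: r →
      PySem.Str.join " " [w1, w2, w3] ∉ pvMultiWordKeywords)
    (hm : PySem.Str.join " " [w1, w2] ∈ pvMultiWordKeywords)
    (hfa : tokens.length ≤ i + fa) :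
    pvLoopA tokens fa i =
      ("word", PySem.Str.join " " [w1, w2]) :: pvLoopA tokens (fa - 1) (i2 + 1) := by
  obtain ⟨hii1, hi1l, hrest1, -⟩ :=
    pvSpineFrom_head tokens tokens.length i i1 (some w1) _ (by omega) hsp
  obtain ⟨hii2, hi2l, hrest2, -⟩ :=
    pvSpineFrom_head tokens tokens.length (i1+1) i2 (some w2) _ (by omega) hrest1.symm
  have hg2 : pvG tokens i 2 = [(w1, i1+1), (w2, i2+1)] := by
    rw [pvG_take tokens i 2 3 (by omega), pvG_spine, hsp]
    rcases rest with _ | ⟨⟨i3, e3⟩, r⟩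
    · rfl
    · rcases e3 with _ | w3 <;> rfl
  have hA3 : (pvScanA tokens i [] 3).1 = (pvWtake 3 ((i1, some w1) :: (i2, some w2) :: rest)).map Prod.fst := by
    have h := pvScanA_fst tokens i [] 3 (by simp)
    rw [show (3 - List.length ([] : List String)) = 3 from rfl, pvG_spine, hsp] at h
    simpa using h
  have hA2 : (pvScanA tokens i [] 2).1 = [w1, w2] := by
    have h := pvScanA_fst tokens i [] 2 (by simp)
    rw [show (2 - List.length ([] : List String)) = 2 from rfl, hg2] at h
    simpa using h
  have hsnd : (pvScanA tokens i [] 2).2 = i2 + 1 := by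
    have h := pvScanA_snd_full tokens i [] 2 (by simp)
      (by rw [show (2 - List.length ([] : List String)) = 2 from rfl, hg2]; rfl)
    rw [show (2 - List.length ([] : List String)) = 2 from rfl, hg2] at h
    simpa using h
  have hneg3 : ¬ ((pvScanA tokens i [] 3).1.length = 3 ∧
      PySem.Str.join " " (pvScanA tokens i [] 3).1 ∈ pvMultiWordKeywords) := by
    rcases rest with _ | ⟨⟨i3, e3⟩, r⟩
    · simp [hA3, pvWtake]
    · rcases e3 with _ | w3
      · simp [hA3, pvWtake]
      · have := hno3 i3 w3 r rfl
        simp [hA3, pvWtake, this]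
  cases fa with
  | zero => omega
  | succ f =>
      rw [pvLoopA, dif_pos (by omega), dif_neg hneg3,
          dif_pos (⟨by rw [hA2]; rfl, by rw [hA2]; exact hm⟩ :
            (pvScanA tokens i [] 2).1.length = 2 ∧ _)]
      rw [hA2, hsnd]
      simp

-- A emits the all-whitespace tail verbatim
theorem pvA_tail (tokens : List (String × String)) :
    ∀ fa i, pvSpineFrom tokens i = [] → tokens.length ≤ i + fa →
      pvLoopA tokens fa i = tokens.drop i := by
  intro fa
  induction fa with
  | zero =>
      intro i hsp hfa
      rw [pvLoopA, List.drop_eq_nil_of_le (by omega)]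
  | succ f ih =>
      intro i hsp hfa
      by_cases hi : i < tokens.length
      · have hA3 : (pvScanA tokens i [] 3).1 = [] := by
          have h := pvScanA_fst tokens i [] 3 (by simp)
          rw [show (3 - List.length ([] : List String)) = 3 from rfl, pvG_spine, hsp] at h
          simpa [pvWtake] using h
        have hA2 : (pvScanA tokens i [] 2).1 = [] := by
          have h := pvScanA_fst tokens i [] 2 (by simp)
          rw [show (2 - List.length ([] : List String)) = 2 from rfl,
              pvG_take tokens i 2 3 (by omega), pvG_spine, hsp] at h
          simpa [pvWtake] using h
        have hwsi : (tokens[i]).1 = "whitespace" :=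
          pvSpineFrom_nil tokens tokens.length i (by omega) hsp i hi (le_refl i)
        have hsp' : pvSpineFrom tokens (i+1) = [] := by
          rw [← pvSpineFrom_ws tokens hi hwsi]; exact hsp
        rw [pvLoopA, dif_pos hi, dif_neg (by simp [hA3]), dif_neg (by simp [hA2]),
            ih (i+1) hsp' (by omega), List.drop_eq_getElem_cons hi]
      · rw [pvLoopA, List.drop_eq_nil_of_le (by omega)]
        simp [hi]

-- slicing bridges
theorem pvSlice_from (tokens : List (String × String)) (pos : Nat) :
    PySem.List.slice tokens (some (pos : Int)) none = tokens.drop pos :=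
  PySem.List.slice_from_natCast tokens pos

theorem pvSlice_nat (tokens : List (String × String)) (pos start : Nat) :
    PySem.List.slice tokens (some (pos : Int)) (some (start : Int)) =
      (tokens.drop pos).take (start - pos) :=
  PySem.List.slice_natCast tokens pos start

theorem pvW3_eq (S0 : List (Nat × Option String)) (k : Nat) :
    PySem.List.slice S0 (some (k : Int)) (some ((k : Int) + 3)) = (S0.drop k).take 3 := by
  rw [show ((k : Int) + 3) = ((k + 3 : Nat) : Int) by push_cast; ring,
      PySem.List.slice_natCast, show k + 3 - k = 3 by omega]

theorem pvTake_chain {α : Type} (l : List α) (pos start t : Nat)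
    (h1 : pos ≤ start) (h2 : start ≤ t) :
    (l.drop pos).take (start - pos) ++ (l.drop start).take (t - start) =
      (l.drop pos).take (t - pos) := by
  rw [show t - pos = (start - pos) + (t - start) by omega, List.take_add,
      List.drop_drop, show pos + (start - pos) = start by omega]

theorem pvTail_eq (tokens : List (String × String)) (fa pos start : Nat)
    (hS : pvSpineFrom tokens start = [])
    (hps : pos ≤ start) (hfa : tokens.length ≤ start + fa) :
    (tokens.drop pos).take (start - pos) ++ pvLoopA tokens fa start = tokens.drop pos := by
  rw [pvA_tail tokens fa start hS hfa]
  conv_rhs => rw [← List.take_append_drop (start - pos) (tokens.drop pos)]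
  rw [List.drop_drop, show pos + (start - pos) = start by omega]

-- the invariant proposition of the main synchronisation
def pvInv (tokens : List (String × String)) (fb fa k pos start : Nat) : Prop :=
  (pvSpineFrom tokens 0).drop k = pvSpineFrom tokens start →
  pos ≤ start → start ≤ tokens.length →
  tokens.length ≤ start + fa → (pvSpineFrom tokens 0).length ≤ k + fb →
  (tokens.drop pos).take (start - pos) ++ pvLoopA tokens fa start =
    pvLoopB tokens (pvSpineFrom tokens 0) fb k pos start

-- one non-merge step: A walks to the spine head and past it, B bumps k
theorem pvSkipStep (tokens : List (String × String)) (fb fa k pos start : Nat)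
    (i1 : Nat) (e1 : Option String) (rest : List (Nat × Option String))
    (ih : ∀ fa k pos start, pvInv tokens fb fa k pos start)
    (hdrop : (pvSpineFrom tokens 0).drop k = pvSpineFrom tokens start)
    (hS : pvSpineFrom tokens start = (i1, e1) :: rest)
    (hno3 : ∀ w1 i2 w2 i3 w3 r, e1 = some w1 → rest = (i2, some w2) :: (i3, some w3) :: r →
      PySem.Str.join " " [w1, w2, w3] ∉ pvMultiWordKeywords)
    (hno2 : ∀ w1 i2 w2 r, e1 = some w1 → rest = (i2, some w2) :: r →
      PySem.Str.join " " [w1, w2] ∉ pvMultiWordKeywords)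
    (hps : pos ≤ start) (hsl : start ≤ tokens.length)
    (hfa : tokens.length ≤ start + fa) (hfb : (pvSpineFrom tokens 0).length ≤ (k + 1) + fb) :
    (tokens.drop pos).take (start - pos) ++ pvLoopA tokens fa start =
      pvLoopB tokens (pvSpineFrom tokens 0) fb (k + 1) pos (i1 + 1) := by
  obtain ⟨hij, hjl, hrest, -⟩ :=
    pvSpineFrom_head tokens tokens.length start i1 e1 rest (by omega) hS
  rw [pvA_skip tokens i1 e1 rest hno3 hno2 (i1 - start) start fa hS rfl hfa,
      ← List.append_assoc, pvTake_chain tokens pos start (i1 + 1) hps (by omega)]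
  have hd1 : (pvSpineFrom tokens 0).drop (k + 1) = pvSpineFrom tokens (i1 + 1) := by
    have h := congrArg (List.drop 1) hdrop
    rw [List.drop_drop] at h
    rw [h, hS, ← hrest]
    simp
  exact ih (fa - (i1 + 1 - start)) (k + 1) pos (i1 + 1) hd1 (by omega) (by omega)
    (by omega) hfb

-- main synchronisation between A's loop and B's staged loop
theorem pvMain (tokens : List (String × String)) :
    ∀ fb fa k pos start, pvInv tokens fb fa k pos start := by
  intro fb
  induction fb with
  | zero =>
      intro fa k pos start hdrop hps hsl hfa hfb
      have hS : pvSpineFrom tokens start = [] := by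
        rw [← hdrop, List.drop_eq_nil_of_le (by omega)]
      rw [pvLoopB, pvSlice_from]
      exact pvTail_eq tokens fa pos start hS hps hfa
  | succ fb ih =>
      intro fa k pos start hdrop hps hsl hfa hfb
      by_cases hk : k < (pvSpineFrom tokens 0).length
      case neg =>
        have hS : pvSpineFrom tokens start = [] := by
          rw [← hdrop, List.drop_eq_nil_of_le (by omega)]
        rw [pvLoopB]
        simp only [if_neg hk]
        rw [pvSlice_from]
        exact pvTail_eq tokens fa pos start hS hps hfa
      case pos =>
      rcases hS : pvSpineFrom tokens start with _ | ⟨⟨i1, e1⟩, rest⟩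
      · exact absurd (hdrop.trans hS) (by simp; omega)
      obtain ⟨hii1, hi1l, hrest1, -⟩ :=
        pvSpineFrom_head tokens tokens.length start i1 e1 rest (by omega) hS
      have hw3 : PySem.List.slice (pvSpineFrom tokens 0) (some (k : Int)) (some ((k : Int) + 3)) =
          ((i1, e1) :: rest).take 3 := by
        rw [pvW3_eq, hdrop, hS]
      rw [pvLoopB]
      simp only [if_pos hk, hw3]
      rcases e1 with _ | w1
      · -- spine head is a non-word separator: no merge possible
        rw [if_neg (by simp), if_neg (by simp [pvDefEnt])]
        exact pvSkipStep tokens fb fa k pos start i1 none rest ih hdrop hS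
          (by intro _ _ _ _ _ _ h; cases h) (by intro _ _ _ _ h; cases h)
          hps hsl hfa (by omega)
      rcases rest with _ | ⟨⟨i2, e2⟩, rest2⟩
      · -- single trailing word
        rw [if_neg (by simp), if_neg (by simp [pvDefEnt])]
        exact pvSkipStep tokens fb fa k pos start i1 (some w1) [] ih hdrop hS
          (by intro _ _ _ _ _ _ _ h; cases h) (by intro _ _ _ _ _ h; cases h)
          hps hsl hfa (by omega)
      obtain ⟨hii2, hi2l, hrest2, -⟩ :=
        pvSpineFrom_head tokens tokens.length (i1+1) i2 e2 rest2 (by omega) hrest1.symm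
      have hd2 : (pvSpineFrom tokens 0).drop (k + 2) = pvSpineFrom tokens (i2 + 1) := by
        have h := congrArg (List.drop 2) hdrop
        rw [List.drop_drop] at h
        rw [h, hS, ← hrest2]
        simp
      rcases e2 with _ | w2
      · -- second spine element is a separator
        rw [if_neg (by simp), if_neg (by simp [pvDefEnt])]
        exact pvSkipStep tokens fb fa k pos start i1 (some w1) ((i2, none) :: rest2) ih hdrop hS
          (by intro _ _ _ _ _ _ _ h; cases h) (by intro w1x i2x w2x rx h1 h2; simp_all)
          hps hsl hfa (by omega)
      -- two leading words; the three-word candidate depends on the third spine entry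
      rcases hr2 : rest2 with _ | ⟨⟨i3, e3⟩, rest3⟩
      · subst hr2
        by_cases hm2 : PySem.Str.join " " [w1, w2] ∈ pvMultiWordKeywords
        · have hc2 : PySem.Str.join " " [w1, w2] ∈ pvKeywordSet := by
            simp [pvKeywordSet, PySem.Set.mem_ofList]; exact hm2
          rw [if_neg (by simp), if_pos (by simp [hc2]),
              pvA_merge2 tokens start fa i1 i2 w1 w2 [] hS (by intro _ _ _ h; cases h) hm2 hfa,
              pvSlice_nat]
          congr 1
          refine congrArg₂ List.cons rfl ?_
          have := ih (fa - 1) (k + 2) (i2 + 1) (i2 + 1) hd2 (le_refl _) (by omega)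
            (by omega) (by omega)
          simpa using this
        · have hc2 : PySem.Str.join " " [w1, w2] ∉ pvKeywordSet := by
            simp [pvKeywordSet, PySem.Set.mem_ofList]; exact hm2
          rw [if_neg (by simp), if_neg (by simp [hc2])]
          exact pvSkipStep tokens fb fa k pos start i1 (some w1) [(i2, some w2)] ih hdrop hS
            (by intro w1x i2x w2x i3x w3x rx h1 h2
                simp only [List.cons.injEq] at h2
                exact absurd h2.2 (by simp))
            (by intro w1x i2x w2x rx h1 h2
                injection h1 with h1
                subst h1
                simp only [List.cons.injEq, Prod.mk.injEq, Option.some.injEq] at h2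
                obtain ⟨⟨-, hw⟩, -⟩ := h2
                subst hw
                exact hm2)
            hps hsl hfa (by omega)
      · subst hr2
        obtain ⟨hii3, hi3l, hrest3, -⟩ :=
          pvSpineFrom_head tokens tokens.length (i2+1) i3 e3 rest3 (by omega) hrest2.symm
        have hd3 : (pvSpineFrom tokens 0).drop (k + 3) = pvSpineFrom tokens (i3 + 1) := by
          have h := congrArg (List.drop 3) hdrop
          rw [List.drop_drop] at h
          rw [h, hS, ← hrest3]
          simp
        rcases e3 with _ | w3
        · -- third spine element is a separator: only the two-word candidate
          by_cases hm2 : PySem.Str.join " " [w1, w2] ∈ pvMultiWordKeywords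
          · have hc2 : PySem.Str.join " " [w1, w2] ∈ pvKeywordSet := by
              simp [pvKeywordSet, PySem.Set.mem_ofList]; exact hm2
            rw [if_neg (by simp), if_pos (by simp [hc2]),
                pvA_merge2 tokens start fa i1 i2 w1 w2 ((i3, none) :: rest3) hS
                  (by intro i3x w3x rx h; simp_all) hm2 hfa,
                pvSlice_nat]
            congr 1
            refine congrArg₂ List.cons rfl ?_
            have := ih (fa - 1) (k + 2) (i2 + 1) (i2 + 1) hd2 (le_refl _) (by omega)
              (by omega) (by omega)
            simpa using this
          · have hc2 : PySem.Str.join " " [w1, w2] ∉ pvKeywordSet := by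
              simp [pvKeywordSet, PySem.Set.mem_ofList]; exact hm2
            rw [if_neg (by simp), if_neg (by simp [hc2])]
            exact pvSkipStep tokens fb fa k pos start i1 (some w1)
              ((i2, some w2) :: (i3, none) :: rest3) ih hdrop hS
              (by intro w1x i2x w2x i3x w3x rx h1 h2; simp_all)
              (by intro w1x i2x w2x rx h1 h2; simp_all)
              hps hsl hfa (by omega)
        · -- three leading words
          by_cases hm3 : PySem.Str.join " " [w1, w2, w3] ∈ pvMultiWordKeywords
          · have hc3 : PySem.Str.join " " [w1, w2, w3] ∈ pvKeywordSet := by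
              simp [pvKeywordSet, PySem.Set.mem_ofList]; exact hm3
            rw [if_pos (by simp [hc3]),
                pvA_merge3 tokens start fa i1 i2 i3 w1 w2 w3 rest3 hS hm3 hfa, pvSlice_nat]
            congr 1
            refine congrArg₂ List.cons rfl ?_
            have := ih (fa - 1) (k + 3) (i3 + 1) (i3 + 1) hd3 (le_refl _) (by omega)
              (by omega) (by omega)
            simpa using this
          · have hc3 : PySem.Str.join " " [w1, w2, w3] ∉ pvKeywordSet := by
              simp [pvKeywordSet, PySem.Set.mem_ofList]; exact hm3
            by_cases hm2 : PySem.Str.join " " [w1, w2] ∈ pvMultiWordKeywords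
            · have hc2 : PySem.Str.join " " [w1, w2] ∈ pvKeywordSet := by
                simp [pvKeywordSet, PySem.Set.mem_ofList]; exact hm2
              rw [if_neg (by simp [hc3]), if_pos (by simp [hc2]),
                  pvA_merge2 tokens start fa i1 i2 w1 w2 ((i3, some w3) :: rest3) hS
                    (by intro i3x w3x rx h; simp_all) hm2 hfa,
                  pvSlice_nat]
              congr 1
              refine congrArg₂ List.cons rfl ?_
              have := ih (fa - 1) (k + 2) (i2 + 1) (i2 + 1) hd2 (le_refl _) (by omega)
                (by omega) (by omega)
              simpa using this
            · have hc2 : PySem.Str.join " " [w1, w2] ∉ pvKeywordSet := by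
                simp [pvKeywordSet, PySem.Set.mem_ofList]; exact hm2
              rw [if_neg (by simp [hc3]), if_neg (by simp [hc2])]
              exact pvSkipStep tokens fb fa k pos start i1 (some w1)
                ((i2, some w2) :: (i3, some w3) :: rest3) ih hdrop hS
                (by intro w1x i2x w2x i3x w3x rx h1 h2; simp_all)
                (by intro w1x i2x w2x rx h1 h2; simp_all)
                hps hsl hfa (by omega)

-- ===== VERDICT (by name: the statement is the Claim_ definition above) =====
theorem merge_multi_word_keywords_py_spec : Claim_equal_merge_multi_word_keywords_py := by
  intro tokens _
  unfold Spec_merge_multi_word_keywords_py merge_multi_word_keywords_py merge_multi_word_keywords_py_alt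
  rw [pvSpine_build]
  have h := pvMain tokens (pvSpineFrom tokens 0).length tokens.length 0 0 0
    (by simp) (le_refl 0) (by omega) (by omega) (by omega)
  simpa using h
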